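-- pv_equiv track=rewrite | github.com/Tbeninnovation/Baiss | core/baiss/shared/python/baiss_agents/app/api/v1/endpoints/models.py | _get_model_id_from_url
-- ===== SOURCE A (Python) =====
-- def _get_model_id_from_url(url: str) -> str:
--     if not isinstance(url, str):
--         raise ValueError("Invalid URL")
--     url = url.strip().strip("/")
--     for scheme in ["http://", "https://"]:
--         for subdomain in ["www.", ""]:
--             for domain in ["huggingface.co"]:
--                 prefix = f"{scheme}{subdomain}{domain}/"
--                 if url.startswith(prefix):
--                     model_id = url[len(prefix):].strip("/")
--                     model_id = "/".join(model_id.split("/")[:2])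
--                     return (model_id)
--     model_id = "/".join(url.split("/")[:2])
--     return (model_id)
-- ===== SOURCE B (Python) =====
-- def _get_model_id_from_url(url: str) -> str:
--     if not isinstance(url, str):
--         raise ValueError("Invalid URL")
--     parts = url.strip().strip("/").split("/")
--     if (len(parts) >= 4 and parts[0] in ("http:", "https:")
--             and parts[1] == "" and parts[2] in ("huggingface.co", "www.huggingface.co")):
--         tail = parts[3:]
--         while tail and tail[0] == "":
--             tail = tail[1:]
--         while tail and tail[-1] == "":
--             tail = tail[:-1]
--         return "/".join(tail[:2])
--     return "/".join(parts[:2])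
-- ===== Notes on version B (the rewrite author's own statement) =====
-- stated objective: alternative
-- what changed: Replaces A's character-level enumeration of four assembled scheme/subdomain/domain prefixes by a single tokenization: split the normalized url into slash-separated segments once and decide the huggingface case by comparing segments, trimming empty edge segments of the tail instead of re-stripping the remainder string.
import Mathlib
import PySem

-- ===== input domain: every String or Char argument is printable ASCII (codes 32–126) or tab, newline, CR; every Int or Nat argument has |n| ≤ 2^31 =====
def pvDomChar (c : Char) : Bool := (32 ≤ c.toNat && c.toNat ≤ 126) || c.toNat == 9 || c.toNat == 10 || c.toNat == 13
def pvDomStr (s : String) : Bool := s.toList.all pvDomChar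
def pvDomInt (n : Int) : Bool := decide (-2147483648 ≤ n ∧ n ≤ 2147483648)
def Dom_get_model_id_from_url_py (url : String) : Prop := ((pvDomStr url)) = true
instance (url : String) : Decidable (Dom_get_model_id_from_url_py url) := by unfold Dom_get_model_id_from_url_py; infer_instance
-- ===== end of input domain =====

-- B replaces A's character-level enumeration of four assembled URL prefixes by a single
-- tokenization: split the normalized url into '/'-separated segments once and decide by
-- comparing segments (objective: alternative decomposition, same cost).

-- shared line of both Pythons: "/".join(x.split("/")[:2])
def pvTail2 (r : String) : String :=
  PySem.Str.join "/" (PySem.List.slice ((PySem.Str.split? r "/").getD []) none (some 2))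

-- ===== PORT A =====
def get_model_id_from_url_py (url : String) : String :=
  let u := PySem.Str.stripChars (PySem.Str.strip url) "/"
  let res : Option String :=
    ["http://", "https://"].foldl (fun acc scheme =>
      ["www.", ""].foldl (fun acc2 subdomain =>
        ["huggingface.co"].foldl (fun acc3 domain =>
          match acc3 with
          | some r => some r
          | none =>
            let pre := scheme ++ subdomain ++ domain ++ "/"
            if PySem.Str.startswith u pre then
              some (pvTail2 (PySem.Str.stripChars
                      (PySem.Str.slice u (some (PySem.Str.len pre)) none) "/"))
            else none) acc2) acc) none
  res.getD (pvTail2 u)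

-- ===== PORT B =====
def get_model_id_from_url_py_alt (url : String) : String :=
  let parts := (PySem.Str.split? (PySem.Str.stripChars (PySem.Str.strip url) "/") "/").getD []
  match parts with
  | p0 :: p1 :: p2 :: p3 :: rest =>
    if (p0 == "http:" || p0 == "https:") && p1 == ""
        && (p2 == "huggingface.co" || p2 == "www.huggingface.co") then
      let tail := (p3 :: rest).dropWhile (· == "")
      let tail := (tail.reverse.dropWhile (· == "")).reverse
      PySem.Str.join "/" (PySem.List.slice tail none (some 2))
    else PySem.Str.join "/" (PySem.List.slice parts none (some 2))
  | _ => PySem.Str.join "/" (PySem.List.slice parts none (some 2))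

-- ===== PRECONDITION & SPEC =====
def Spec_get_model_id_from_url_py (url : String) (out : String) : Prop := out = get_model_id_from_url_py_alt url
instance (url : String) (out : String) : Decidable (Spec_get_model_id_from_url_py url out) := by unfold Spec_get_model_id_from_url_py; infer_instance

-- ===== CLAIM (what is proved, stated in full; the proofs are below) =====
def Claim_equal_get_model_id_from_url_py : Prop := ∀ (url : String), Dom_get_model_id_from_url_py url → Spec_get_model_id_from_url_py url (get_model_id_from_url_py url)

-- ===== LEMMAS AND PROOFS =====

-- Python's  s.split('/')  on a char list, by plain structural recursion.
def pvSplit : List Char → List (List Char)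
  | [] => [[]]
  | a :: rest =>
    if a = '/' then [] :: pvSplit rest
    else
      match pvSplit rest with
      | [] => [[a]]
      | h :: t => (a :: h) :: t

theorem pvSplit_ne_nil (s : List Char) : pvSplit s ≠ [] := by
  induction s with
  | nil => simp [pvSplit]
  | cons a rest ih =>
    by_cases hc : a = '/'
    · simp [pvSplit, hc]
    · rcases h : pvSplit rest with _ | ⟨hh, t⟩ <;> simp [pvSplit, hc, h]

theorem pvGo_eq (fuel : Nat) : ∀ (s cur : List Char) (acc : List (List Char)),
    s.length ≤ fuel →
    PySem.Chars.splitOn.go ['/'] fuel s cur acc =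
      acc.reverse ++ (match pvSplit s with
        | [] => []
        | h :: t => (cur.reverse ++ h) :: t) := by
  induction fuel with
  | zero =>
    intro s cur acc hf
    have hs : s = [] := List.eq_nil_of_length_eq_zero (Nat.le_zero.mp hf)
    subst hs
    simp [PySem.Chars.splitOn.go, pvSplit]
  | succ fuel ih =>
    intro s cur acc hf
    cases s with
    | nil => simp [PySem.Chars.splitOn.go, pvSplit]
    | cons a rest =>
      have hlen : rest.length ≤ fuel := by
        simpa [Nat.succ_le_succ_iff] using hf
      by_cases hc : a = '/'
      · subst hc
        rw [show PySem.Chars.splitOn.go ['/'] (fuel+1) ('/'::rest) cur acc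
              = PySem.Chars.splitOn.go ['/'] fuel rest [] (cur.reverse :: acc) by
            simp [PySem.Chars.splitOn.go, List.isPrefixOf]]
        rw [ih rest [] (cur.reverse :: acc) hlen]
        rcases hr : pvSplit rest with _ | ⟨hh, t⟩
        · exact absurd hr (pvSplit_ne_nil rest)
        · simp [pvSplit, hr]
      · rw [show PySem.Chars.splitOn.go ['/'] (fuel+1) (a::rest) cur acc
              = PySem.Chars.splitOn.go ['/'] fuel rest (a :: cur) acc by
            simp [PySem.Chars.splitOn.go, List.isPrefixOf, Ne.symm hc]]
        rw [ih rest (a :: cur) acc hlen]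
        rcases hr : pvSplit rest with _ | ⟨hh, t⟩
        · exact absurd hr (pvSplit_ne_nil rest)
        · simp [pvSplit, hc, hr]

theorem pvSplitOn_eq (s : List Char) : PySem.Chars.splitOn s ['/'] = pvSplit s := by
  unfold PySem.Chars.splitOn
  rw [pvGo_eq _ _ _ _ (Nat.le_succ _)]
  rcases h : pvSplit s with _ | ⟨hh, t⟩
  · exact absurd h (pvSplit_ne_nil s)
  · simp


theorem pvIc_nil : List.intercalate ['/'] ([] : List (List Char)) = [] := by
  simp [List.intercalate]

theorem pvIc_single (a : List Char) : List.intercalate ['/'] [a] = a := by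
  simp [List.intercalate]

theorem pvIc_cons (a : List Char) (l : List (List Char)) (h : l ≠ []) :
    List.intercalate ['/'] (a :: l) = a ++ '/' :: List.intercalate ['/'] l := by
  rcases l with _ | ⟨b, t⟩
  · exact absurd rfl h
  · simp [List.intercalate]

theorem pvIc_pvSplit (s : List Char) : List.intercalate ['/'] (pvSplit s) = s := by
  induction s with
  | nil => simp [pvSplit, pvIc_single]
  | cons a rest ih =>
    by_cases hc : a = '/'
    · subst hc
      rw [show pvSplit ('/'::rest) = [] :: pvSplit rest by simp [pvSplit]]
      rw [pvIc_cons _ _ (pvSplit_ne_nil rest), ih]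
      simp
    · rcases hr : pvSplit rest with _ | ⟨h, t⟩
      · exact absurd hr (pvSplit_ne_nil rest)
      · rw [show pvSplit (a::rest) = (a :: h) :: t by simp [pvSplit, hc, hr]]
        rcases t with _ | ⟨x, xs⟩
        · rw [pvIc_single] at *
          rw [hr, pvIc_single] at ih
          simp [ih]
        · rw [pvIc_cons _ _ (by simp)]
          rw [hr, pvIc_cons _ _ (by simp)] at ih
          simp [← ih]

theorem pvSplit_noSep (a : List Char) (h : '/' ∉ a) : pvSplit a = [a] := by
  induction a with
  | nil => simp [pvSplit]
  | cons x xs ih =>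
    have hx : x ≠ '/' := fun hx => h (by simp [hx])
    have hxs : '/' ∉ xs := fun hm => h (by simp [hm])
    simp [pvSplit, hx, ih hxs]

theorem pvSplit_append (a b : List Char) (h : '/' ∉ a) :
    pvSplit (a ++ '/' :: b) = a :: pvSplit b := by
  induction a with
  | nil => simp [pvSplit]
  | cons x xs ih =>
    have hx : x ≠ '/' := fun hx => h (by simp [hx])
    have hxs : '/' ∉ xs := fun hm => h (by simp [hm])
    simp [pvSplit, hx, ih hxs]

theorem pvMem_pvSplit_noSep (s : List Char) : ∀ p ∈ pvSplit s, '/' ∉ p := by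
  induction s with
  | nil => intro p hp; simp [pvSplit] at hp; simp [hp]
  | cons a rest ih =>
    intro p hp
    by_cases hc : a = '/'
    · rw [show pvSplit (a::rest) = [] :: pvSplit rest by simp [pvSplit, hc]] at hp
      rcases List.mem_cons.mp hp with h | h
      · simp [h]
      · exact ih p h
    · rcases hr : pvSplit rest with _ | ⟨h, t⟩
      · exact absurd hr (pvSplit_ne_nil rest)
      · rw [show pvSplit (a::rest) = (a :: h) :: t by simp [pvSplit, hc, hr]] at hp
        rcases List.mem_cons.mp hp with h' | h'
        · subst h'
          intro hm
          rcases List.mem_cons.mp hm with h'' | h''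
          · exact hc h''.symm
          · exact ih h (by rw [hr]; simp) h''
        · exact ih p (by rw [hr]; simp [h'])

theorem pvSplit_intercalate (ps : List (List Char)) (hne : ps ≠ [])
    (h : ∀ p ∈ ps, '/' ∉ p) : pvSplit (List.intercalate ['/'] ps) = ps := by
  induction ps with
  | nil => exact absurd rfl hne
  | cons a rest ih =>
    rcases rest with _ | ⟨b, t⟩
    · rw [pvIc_single]; exact pvSplit_noSep a (h a (by simp))
    · rw [pvIc_cons _ _ (by simp), pvSplit_append _ _ (h a (by simp))]
      rw [ih (by simp) (fun p hp => h p (by simp [hp]))]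

theorem pvSplit_url (s0 d t : List Char) (h0 : '/' ∉ s0) (hd : '/' ∉ d) :
    pvSplit (s0 ++ '/' :: '/' :: (d ++ '/' :: t)) = s0 :: [] :: d :: pvSplit t := by
  rw [pvSplit_append _ _ h0,
      show ('/' :: (d ++ '/' :: t)) = [] ++ '/' :: (d ++ '/' :: t) from rfl,
      pvSplit_append _ _ (by simp), pvSplit_append _ _ hd]


theorem pvDropWhile_ic (ps : List (List Char)) (h : ∀ p ∈ ps, '/' ∉ p) :
    List.dropWhile (· == '/') (List.intercalate ['/'] ps) =
      List.intercalate ['/'] (List.dropWhile (· == []) ps) := by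
  induction ps with
  | nil => simp [pvIc_nil]
  | cons a rest ih =>
    rcases a with _ | ⟨x, xs⟩
    · rcases rest with _ | ⟨b, t⟩
      · simp [pvIc_single, pvIc_nil]
      · rw [pvIc_cons _ _ (by simp)]
        simp only [List.nil_append, List.dropWhile_cons]
        simp only [show (('/' : Char) == '/') = true by simp, if_true]
        rw [ih (fun p hp => h p (by simp [hp]))]
        rcases b with _ | ⟨y, ys⟩ <;> simp
    · have hx : x ≠ '/' := by
        have := h (x :: xs) (by simp)
        exact fun hxx => this (by simp [hxx])
      rcases rest with _ | ⟨b, t⟩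
      · simp [pvIc_single, hx]
      · have hdw : List.dropWhile (· == ([] : List Char)) ((x::xs) :: b :: t)
            = (x::xs) :: b :: t := by simp
        rw [hdw, pvIc_cons (x::xs) (b::t) (by simp)]
        simp [hx]

theorem pvIc_append_single (xs : List (List Char)) (y : List Char) (h : xs ≠ []) :
    List.intercalate ['/'] (xs ++ [y]) = List.intercalate ['/'] xs ++ '/' :: y := by
  induction xs with
  | nil => exact absurd rfl h
  | cons a rest ih =>
    rcases rest with _ | ⟨b, t⟩
    · rw [show ([a] : List (List Char)) ++ [y] = a :: [y] from rfl,
          pvIc_cons _ _ (by simp), pvIc_single, pvIc_single]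
    · rw [show (a :: b :: t) ++ [y] = a :: ((b :: t) ++ [y]) from rfl,
          pvIc_cons a ((b :: t) ++ [y]) (by simp), ih (by simp),
          pvIc_cons a (b :: t) (by simp)]
      simp

theorem pvIc_reverse (ps : List (List Char)) :
    (List.intercalate ['/'] ps).reverse =
      List.intercalate ['/'] ((ps.map List.reverse).reverse) := by
  induction ps with
  | nil => simp [pvIc_nil]
  | cons a rest ih =>
    rcases rest with _ | ⟨b, t⟩
    · simp [pvIc_single]
    · rw [pvIc_cons _ _ (by simp), List.reverse_append, List.reverse_cons, ih]
      rw [show ((a :: b :: t).map List.reverse).reverse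
            = ((b :: t).map List.reverse).reverse ++ [a.reverse] by simp]
      rw [pvIc_append_single _ _ (by simp)]
      simp

-- trailing/leading-empty-segment trimming, B's two while loops
def pvTrim (l : List (List Char)) : List (List Char) :=
  ((l.dropWhile (· == [])).reverse.dropWhile (· == [])).reverse

theorem pvRev_empty_pred :
    ((fun x => x == ([] : List Char)) ∘ List.reverse) = (fun x => x == []) := by
  funext x; rcases x with _ | ⟨a, t⟩ <;> simp

theorem pvStrip_ic (ps : List (List Char)) (h : ∀ p ∈ ps, '/' ∉ p) :
    PySem.Chars.stripChars (List.intercalate ['/'] ps) ['/'] =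
      List.intercalate ['/'] (pvTrim ps) := by
  have hcont : (fun c => List.contains ['/'] c) = (fun c => c == '/') := by
    funext c; by_cases hc : c = '/' <;> simp [hc]
  show (List.dropWhile (fun c => List.contains ['/'] c)
          ((List.dropWhile (fun c => List.contains ['/'] c)
            (List.intercalate ['/'] ps)).reverse)).reverse = _
  rw [hcont, pvDropWhile_ic ps h]
  set q := List.dropWhile (· == ([] : List Char)) ps with hq
  have hqf : ∀ p ∈ q, '/' ∉ p := fun p hp =>
    h p ((List.dropWhile_sublist _).mem hp)
  rw [pvIc_reverse q, pvDropWhile_ic _ (by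
    intro p hp
    rw [List.mem_reverse, List.mem_map] at hp
    obtain ⟨r, hr, rfl⟩ := hp
    intro hm
    exact hqf r hr (List.mem_reverse.mp hm))]
  rw [← List.map_reverse, List.dropWhile_map, pvRev_empty_pred, pvIc_reverse]
  simp only [pvTrim, List.map_map]
  simp
  rw [show q = List.dropWhile (fun x => x.isEmpty) ps from by simp [hq]]


theorem pv_sw_iff (u p : String) :
    PySem.Str.startswith u p = true ↔ p.toList <+: u.toList := by
  rw [PySem.Str.startswith_eq, PySem.Chars.startswith_iff]

theorem pv_slice_toList (u : String) (k : Nat) :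
    (PySem.Str.slice u (some (k : Int)) none).toList = u.toList.drop k := by
  rw [PySem.Str.toList_slice, PySem.Chars.slice_eq_listSlice,
      PySem.List.slice_from _ (by exact_mod_cast Int.natCast_nonneg k)]
  simp

theorem pvOfList_beq (x : List Char) (s : String) :
    (String.ofList x == s) = (x == s.toList) := by
  by_cases h : x = s.toList
  · simp [h, String.ofList_toList]
  · simp [h]
    intro hc
    exact h (by rw [← hc, String.toList_ofList])

theorem pvEmpty_pred :
    ((fun x => x == ("" : String)) ∘ String.ofList) = (fun x => x == ([] : List Char)) := by
  funext x
  show (String.ofList x == "") = _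
  rw [pvOfList_beq]
  rfl

theorem pvParts (u : String) :
    (PySem.Str.split? u "/").getD [] = (pvSplit u.toList).map String.ofList := by
  simp [PySem.Str.split?, PySem.Chars.split?,
        show ("/" : String).toList = ['/'] from rfl, pvSplitOn_eq]

theorem pvTail2_toList (r : String) :
    (pvTail2 r).toList = List.intercalate ['/'] ((pvSplit r.toList).take 2) := by
  unfold pvTail2
  rw [pvParts, PySem.List.slice_to _ (by norm_num), PySem.Str.toList_join]
  simp [PySem.Chars.join, List.map_map, ← List.map_take,
        show (Int.toNat 2) = 2 from rfl,
        show (String.toList ∘ String.ofList) = id from funext fun _ => String.toList_ofList]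

theorem pvJoinTake2_toList (l : List (List Char)) :
    (PySem.Str.join "/" (PySem.List.slice (l.map String.ofList) none (some 2))).toList
      = List.intercalate ['/'] (l.take 2) := by
  rw [PySem.List.slice_to _ (by norm_num), PySem.Str.toList_join]
  simp [PySem.Chars.join, List.map_map, ← List.map_take,
        show (Int.toNat 2) = 2 from rfl,
        show (String.toList ∘ String.ofList) = id from funext fun _ => String.toList_ofList]


-- startswith one of the four literal prefixes ↔ the segment list has the matching head shape
theorem pvSW_iff (u : String) (P : String) (s0 d : List Char)
    (h0 : '/' ∉ s0) (hd : '/' ∉ d)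
    (hP : P.toList = s0 ++ '/' :: '/' :: (d ++ ['/'])) :
    PySem.Str.startswith u P = true ↔
      ∃ l, pvSplit u.toList = s0 :: [] :: d :: l ∧ l ≠ [] := by
  rw [pv_sw_iff, hP]
  constructor
  · rintro ⟨t, ht⟩
    have hu : u.toList = s0 ++ '/' :: '/' :: (d ++ '/' :: t) := by
      rw [← ht]; simp
    refine ⟨pvSplit t, ?_, pvSplit_ne_nil t⟩
    rw [hu, pvSplit_url s0 d t h0 hd]
  · rintro ⟨l, hl, hne⟩
    have hu : u.toList = s0 ++ '/' :: '/' :: (d ++ '/' :: List.intercalate ['/'] l) := by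
      conv_lhs => rw [← pvIc_pvSplit u.toList, hl]
      rw [pvIc_cons _ _ (by simp), pvIc_cons _ _ (by simp), pvIc_cons _ _ hne]
      simp
    exact ⟨List.intercalate ['/'] l, by rw [hu]; simp⟩

-- value of the matched branch, on both sides
theorem pvMatch_val (u : String) (P : String) (s0 d p3 : List Char) (tl : List (List Char))
    (hPlit : P.toList = s0 ++ '/' :: '/' :: (d ++ ['/']))
    (hs : pvSplit u.toList = s0 :: [] :: d :: p3 :: tl) :
    pvTail2 (PySem.Str.stripChars (PySem.Str.slice u (some (PySem.Str.len P)) none) "/")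
      = PySem.Str.join "/" (PySem.List.slice
          (((((p3 :: tl).map String.ofList).dropWhile (· == "")).reverse.dropWhile
              (· == "")).reverse)
          none (some 2)) := by
  have hfree : ∀ p ∈ (p3 :: tl), '/' ∉ p := fun p hp =>
    pvMem_pvSplit_noSep u.toList p (by rw [hs]; simp [hp])
  have hu : u.toList = P.toList ++ List.intercalate ['/'] (p3 :: tl) := by
    conv_lhs => rw [← pvIc_pvSplit u.toList, hs]
    rw [pvIc_cons _ _ (by simp), pvIc_cons _ _ (by simp), pvIc_cons _ _ (by simp), hPlit]
    simp
  have hT : (PySem.Str.slice u (some (PySem.Str.len P)) none).toList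
      = List.intercalate ['/'] (p3 :: tl) := by
    rw [PySem.Str.len_eq, pv_slice_toList, hu, List.drop_left]
  have hstrip : (PySem.Str.stripChars (PySem.Str.slice u (some (PySem.Str.len P)) none) "/").toList
      = List.intercalate ['/'] (pvTrim (p3 :: tl)) := by
    rw [PySem.Str.toList_stripChars, hT, show ("/" : String).toList = ['/'] from rfl,
        pvStrip_ic _ hfree]
  rw [← String.toList_inj, pvTail2_toList, hstrip]
  rw [show ((((p3 :: tl).map String.ofList).dropWhile (· == "")).reverse.dropWhile
        (· == "")).reverse = (pvTrim (p3 :: tl)).map String.ofList from by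
      rw [List.dropWhile_map, pvEmpty_pred, ← List.map_reverse, List.dropWhile_map,
          pvEmpty_pred, ← List.map_reverse]
      rfl]
  rw [pvJoinTake2_toList]
  rcases htr : pvTrim (p3 :: tl) with _ | ⟨q, qs⟩
  · simp [pvSplit, pvIc_nil, pvIc_single]
  · have hfree' : ∀ p ∈ q :: qs, '/' ∉ p := by
      intro p hp
      apply hfree
      have hmem : p ∈ pvTrim (p3 :: tl) := by rw [htr]; exact hp
      unfold pvTrim at hmem
      rw [List.mem_reverse] at hmem
      have hmem2 := (List.dropWhile_sublist _).subset hmem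
      rw [List.mem_reverse] at hmem2
      exact (List.dropWhile_sublist _).subset hmem2
    rw [pvSplit_intercalate _ (by simp) hfree']

theorem pv_core (u : String) :
    (let res : Option String :=
      ["http://", "https://"].foldl (fun acc scheme =>
        ["www.", ""].foldl (fun acc2 subdomain =>
          ["huggingface.co"].foldl (fun acc3 domain =>
            match acc3 with
            | some r => some r
            | none =>
              let pre := scheme ++ subdomain ++ domain ++ "/"
              if PySem.Str.startswith u pre then
                some (pvTail2 (PySem.Str.stripChars
                        (PySem.Str.slice u (some (PySem.Str.len pre)) none) "/"))
              else none) acc2) acc) none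
     res.getD (pvTail2 u))
    =
    (let parts := (PySem.Str.split? u "/").getD []
     match parts with
     | p0 :: p1 :: p2 :: p3 :: rest =>
       if (p0 == "http:" || p0 == "https:") && p1 == ""
           && (p2 == "huggingface.co" || p2 == "www.huggingface.co") then
         let tail := (p3 :: rest).dropWhile (· == "")
         let tail := (tail.reverse.dropWhile (· == "")).reverse
         PySem.Str.join "/" (PySem.List.slice tail none (some 2))
       else PySem.Str.join "/" (PySem.List.slice parts none (some 2))
     | _ => PySem.Str.join "/" (PySem.List.slice parts none (some 2))) := by
  have e1 : ("http://" ++ "www." ++ "huggingface.co" ++ "/" : String)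
      = "http://www.huggingface.co/" := rfl
  have e2 : ("http://" ++ "" ++ "huggingface.co" ++ "/" : String)
      = "http://huggingface.co/" := rfl
  have e3 : ("https://" ++ "www." ++ "huggingface.co" ++ "/" : String)
      = "https://www.huggingface.co/" := rfl
  have e4 : ("https://" ++ "" ++ "huggingface.co" ++ "/" : String)
      = "https://huggingface.co/" := rfl
  have hiff1 := pvSW_iff u "http://www.huggingface.co/" "http:".toList
      "www.huggingface.co".toList (by decide) (by decide) (by decide)
  have hiff2 := pvSW_iff u "http://huggingface.co/" "http:".toList
      "huggingface.co".toList (by decide) (by decide) (by decide)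
  have hiff3 := pvSW_iff u "https://www.huggingface.co/" "https:".toList
      "www.huggingface.co".toList (by decide) (by decide) (by decide)
  have hiff4 := pvSW_iff u "https://huggingface.co/" "https:".toList
      "huggingface.co".toList (by decide) (by decide) (by decide)
  rw [pvParts u]
  rcases hs : pvSplit u.toList with _ | ⟨p0, _ | ⟨p1, _ | ⟨p2, _ | ⟨p3, tl⟩⟩⟩⟩
  -- fewer than four segments: no prefix can match, both sides fall through
  case nil =>
    have h1 : PySem.Str.startswith u "http://www.huggingface.co/" = false := by
      rw [Bool.eq_false_iff]; intro h
      obtain ⟨l, hl, -⟩ := hiff1.mp h; rw [hs] at hl; simp at hl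
    have h2 : PySem.Str.startswith u "http://huggingface.co/" = false := by
      rw [Bool.eq_false_iff]; intro h
      obtain ⟨l, hl, -⟩ := hiff2.mp h; rw [hs] at hl; simp at hl
    have h3 : PySem.Str.startswith u "https://www.huggingface.co/" = false := by
      rw [Bool.eq_false_iff]; intro h
      obtain ⟨l, hl, -⟩ := hiff3.mp h; rw [hs] at hl; simp at hl
    have h4 : PySem.Str.startswith u "https://huggingface.co/" = false := by
      rw [Bool.eq_false_iff]; intro h
      obtain ⟨l, hl, -⟩ := hiff4.mp h; rw [hs] at hl; simp at hl
    simp only [List.foldl_cons, List.foldl_nil, e1, e2, e3, e4, h1, h2, h3, h4,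
      Bool.false_eq_true, if_false, Option.getD_none, List.map_nil]
    rw [← String.toList_inj, pvTail2_toList, hs,
        show (PySem.Str.join "/" (PySem.List.slice ([] : List String) none (some 2)))
          = PySem.Str.join "/" (PySem.List.slice (List.map String.ofList []) none (some 2))
          from rfl,
        pvJoinTake2_toList]
  case cons.nil =>
    have h1 : PySem.Str.startswith u "http://www.huggingface.co/" = false := by
      rw [Bool.eq_false_iff]; intro h
      obtain ⟨l, hl, -⟩ := hiff1.mp h; rw [hs] at hl; simp at hl
    have h2 : PySem.Str.startswith u "http://huggingface.co/" = false := by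
      rw [Bool.eq_false_iff]; intro h
      obtain ⟨l, hl, -⟩ := hiff2.mp h; rw [hs] at hl; simp at hl
    have h3 : PySem.Str.startswith u "https://www.huggingface.co/" = false := by
      rw [Bool.eq_false_iff]; intro h
      obtain ⟨l, hl, -⟩ := hiff3.mp h; rw [hs] at hl; simp at hl
    have h4 : PySem.Str.startswith u "https://huggingface.co/" = false := by
      rw [Bool.eq_false_iff]; intro h
      obtain ⟨l, hl, -⟩ := hiff4.mp h; rw [hs] at hl; simp at hl
    simp only [List.foldl_cons, List.foldl_nil, e1, e2, e3, e4, h1, h2, h3, h4,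
      Bool.false_eq_true, if_false, Option.getD_none, List.map_cons, List.map_nil]
    rw [← String.toList_inj, pvTail2_toList, hs,
        show (PySem.Str.join "/" (PySem.List.slice [String.ofList p0] none (some 2)))
          = PySem.Str.join "/" (PySem.List.slice (List.map String.ofList [p0]) none (some 2))
          from rfl,
        pvJoinTake2_toList]
  case cons.cons.nil =>
    have h1 : PySem.Str.startswith u "http://www.huggingface.co/" = false := by
      rw [Bool.eq_false_iff]; intro h
      obtain ⟨l, hl, -⟩ := hiff1.mp h; rw [hs] at hl; simp at hl
    have h2 : PySem.Str.startswith u "http://huggingface.co/" = false := by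
      rw [Bool.eq_false_iff]; intro h
      obtain ⟨l, hl, -⟩ := hiff2.mp h; rw [hs] at hl; simp at hl
    have h3 : PySem.Str.startswith u "https://www.huggingface.co/" = false := by
      rw [Bool.eq_false_iff]; intro h
      obtain ⟨l, hl, -⟩ := hiff3.mp h; rw [hs] at hl; simp at hl
    have h4 : PySem.Str.startswith u "https://huggingface.co/" = false := by
      rw [Bool.eq_false_iff]; intro h
      obtain ⟨l, hl, -⟩ := hiff4.mp h; rw [hs] at hl; simp at hl
    simp only [List.foldl_cons, List.foldl_nil, e1, e2, e3, e4, h1, h2, h3, h4,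
      Bool.false_eq_true, if_false, Option.getD_none, List.map_cons, List.map_nil]
    rw [← String.toList_inj, pvTail2_toList, hs,
        show (PySem.Str.join "/" (PySem.List.slice [String.ofList p0, String.ofList p1] none (some 2)))
          = PySem.Str.join "/" (PySem.List.slice (List.map String.ofList [p0, p1]) none (some 2))
          from rfl,
        pvJoinTake2_toList]
  case cons.cons.cons.nil =>
    have h1 : PySem.Str.startswith u "http://www.huggingface.co/" = false := by
      rw [Bool.eq_false_iff]; intro h
      obtain ⟨l, hl, hne⟩ := hiff1.mp h; rw [hs] at hl; simp at hl
      exact hne hl.2.2.2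
    have h2 : PySem.Str.startswith u "http://huggingface.co/" = false := by
      rw [Bool.eq_false_iff]; intro h
      obtain ⟨l, hl, hne⟩ := hiff2.mp h; rw [hs] at hl; simp at hl
      exact hne hl.2.2.2
    have h3 : PySem.Str.startswith u "https://www.huggingface.co/" = false := by
      rw [Bool.eq_false_iff]; intro h
      obtain ⟨l, hl, hne⟩ := hiff3.mp h; rw [hs] at hl; simp at hl
      exact hne hl.2.2.2
    have h4 : PySem.Str.startswith u "https://huggingface.co/" = false := by
      rw [Bool.eq_false_iff]; intro h
      obtain ⟨l, hl, hne⟩ := hiff4.mp h; rw [hs] at hl; simp at hl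
      exact hne hl.2.2.2
    simp only [List.foldl_cons, List.foldl_nil, e1, e2, e3, e4, h1, h2, h3, h4,
      Bool.false_eq_true, if_false, Option.getD_none, List.map_cons, List.map_nil]
    rw [← String.toList_inj, pvTail2_toList, hs,
        show (PySem.Str.join "/" (PySem.List.slice
            [String.ofList p0, String.ofList p1, String.ofList p2] none (some 2)))
          = PySem.Str.join "/" (PySem.List.slice (List.map String.ofList [p0, p1, p2]) none (some 2))
          from rfl,
        pvJoinTake2_toList]
  case cons.cons.cons.cons =>
    simp only [List.map_cons]
    by_cases hg : (p0 = "http:".toList ∨ p0 = "https:".toList) ∧ p1 = []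
        ∧ (p2 = "huggingface.co".toList ∨ p2 = "www.huggingface.co".toList)
    · obtain ⟨hp0, hp1, hp2⟩ := hg
      subst hp1
      rcases hp0 with hp0 | hp0 <;> rcases hp2 with hp2 | hp2 <;> subst hp0 <;> subst hp2
      · -- http: / huggingface.co
        have h2 : PySem.Str.startswith u "http://huggingface.co/" = true :=
          hiff2.mpr ⟨p3 :: tl, hs, by simp⟩
        have h1 : PySem.Str.startswith u "http://www.huggingface.co/" = false := by
          rw [Bool.eq_false_iff]; intro h
          obtain ⟨l, hl, -⟩ := hiff1.mp h; rw [hs] at hl; simp at hl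
        simp only [List.foldl_cons, List.foldl_nil, e1, e2, h1, h2,
          Bool.false_eq_true, if_false, if_true, Option.getD_some]
        rw [pvMatch_val u "http://huggingface.co/" "http:".toList
            "huggingface.co".toList p3 tl (by decide) hs]
        simp
      · -- http: / www.huggingface.co
        have h1 : PySem.Str.startswith u "http://www.huggingface.co/" = true :=
          hiff1.mpr ⟨p3 :: tl, hs, by simp⟩
        simp only [List.foldl_cons, List.foldl_nil, e1, h1,
          if_true, Option.getD_some]
        rw [pvMatch_val u "http://www.huggingface.co/" "http:".toList
            "www.huggingface.co".toList p3 tl (by decide) hs]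
        simp
      · -- https: / huggingface.co
        have h4 : PySem.Str.startswith u "https://huggingface.co/" = true :=
          hiff4.mpr ⟨p3 :: tl, hs, by simp⟩
        have h1 : PySem.Str.startswith u "http://www.huggingface.co/" = false := by
          rw [Bool.eq_false_iff]; intro h
          obtain ⟨l, hl, -⟩ := hiff1.mp h; rw [hs] at hl; simp at hl
        have h2 : PySem.Str.startswith u "http://huggingface.co/" = false := by
          rw [Bool.eq_false_iff]; intro h
          obtain ⟨l, hl, -⟩ := hiff2.mp h; rw [hs] at hl; simp at hl
        have h3 : PySem.Str.startswith u "https://www.huggingface.co/" = false := by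
          rw [Bool.eq_false_iff]; intro h
          obtain ⟨l, hl, -⟩ := hiff3.mp h; rw [hs] at hl; simp at hl
        simp only [List.foldl_cons, List.foldl_nil, e1, e2, e3, e4, h1, h2, h3, h4,
          Bool.false_eq_true, if_false, if_true, Option.getD_some]
        rw [pvMatch_val u "https://huggingface.co/" "https:".toList
            "huggingface.co".toList p3 tl (by decide) hs]
        simp
      · -- https: / www.huggingface.co
        have h3 : PySem.Str.startswith u "https://www.huggingface.co/" = true :=
          hiff3.mpr ⟨p3 :: tl, hs, by simp⟩
        have h1 : PySem.Str.startswith u "http://www.huggingface.co/" = false := by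
          rw [Bool.eq_false_iff]; intro h
          obtain ⟨l, hl, -⟩ := hiff1.mp h; rw [hs] at hl; simp at hl
        have h2 : PySem.Str.startswith u "http://huggingface.co/" = false := by
          rw [Bool.eq_false_iff]; intro h
          obtain ⟨l, hl, -⟩ := hiff2.mp h; rw [hs] at hl; simp at hl
        simp only [List.foldl_cons, List.foldl_nil, e1, e2, e3, h1, h2, h3,
          Bool.false_eq_true, if_false, if_true, Option.getD_some]
        rw [pvMatch_val u "https://www.huggingface.co/" "https:".toList
            "www.huggingface.co".toList p3 tl (by decide) hs]
        simp
    · -- four segments but not the huggingface shape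
      have h1 : PySem.Str.startswith u "http://www.huggingface.co/" = false := by
        rw [Bool.eq_false_iff]; intro h
        obtain ⟨l, hl, -⟩ := hiff1.mp h; rw [hs] at hl; simp at hl
        exact hg ⟨Or.inl hl.1, hl.2.1, Or.inr hl.2.2.1⟩
      have h2 : PySem.Str.startswith u "http://huggingface.co/" = false := by
        rw [Bool.eq_false_iff]; intro h
        obtain ⟨l, hl, -⟩ := hiff2.mp h; rw [hs] at hl; simp at hl
        exact hg ⟨Or.inl hl.1, hl.2.1, Or.inl hl.2.2.1⟩
      have h3 : PySem.Str.startswith u "https://www.huggingface.co/" = false := by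
        rw [Bool.eq_false_iff]; intro h
        obtain ⟨l, hl, -⟩ := hiff3.mp h; rw [hs] at hl; simp at hl
        exact hg ⟨Or.inr hl.1, hl.2.1, Or.inr hl.2.2.1⟩
      have h4 : PySem.Str.startswith u "https://huggingface.co/" = false := by
        rw [Bool.eq_false_iff]; intro h
        obtain ⟨l, hl, -⟩ := hiff4.mp h; rw [hs] at hl; simp at hl
        exact hg ⟨Or.inr hl.1, hl.2.1, Or.inl hl.2.2.1⟩
      have hcond : ((String.ofList p0 == "http:" || String.ofList p0 == "https:")
          && String.ofList p1 == ""
          && (String.ofList p2 == "huggingface.co" || String.ofList p2 == "www.huggingface.co"))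
          = false := by
        rw [Bool.eq_false_iff]; intro h
        rw [pvOfList_beq, pvOfList_beq, pvOfList_beq, pvOfList_beq, pvOfList_beq] at h
        simp only [Bool.and_eq_true, Bool.or_eq_true, beq_iff_eq] at h
        exact hg ⟨h.1.1, h.1.2, h.2⟩
      simp only [List.foldl_cons, List.foldl_nil, e1, e2, e3, e4, h1, h2, h3, h4,
        Bool.false_eq_true, if_false, Option.getD_none, hcond]
      rw [← String.toList_inj, pvTail2_toList, hs,
          show (PySem.Str.join "/" (PySem.List.slice
              (String.ofList p0 :: String.ofList p1 :: String.ofList p2 :: String.ofList p3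
                :: List.map String.ofList tl) none (some 2)))
            = PySem.Str.join "/" (PySem.List.slice
                (List.map String.ofList (p0 :: p1 :: p2 :: p3 :: tl)) none (some 2))
            from rfl,
          pvJoinTake2_toList]

-- ===== VERDICT (by name: the statement is the Claim_ definition above) =====
theorem get_model_id_from_url_py_spec : Claim_equal_get_model_id_from_url_py := by
  intro url _
  unfold Spec_get_model_id_from_url_py get_model_id_from_url_py get_model_id_from_url_py_alt
  exact pv_core (PySem.Str.stripChars (PySem.Str.strip url) "/")
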